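-- pv_equiv track=rewrite | github.com/Cmathou/Hashcode-2020 | utilsAntoine.py | CalcLibScore
-- ===== SOURCE A (Python) =====
-- def sortBooks(Scores, listBooks):
--     listScores = []
--     for i in listBooks:#range(len(listBooks)):
--         listScores.append(Scores[i])
--     # listScores = [Scores[i] for i in listBooks]
--     ponderee = [x for _,x in sorted(zip(listScores, listBooks), reverse=True)]
--
--     return ponderee
--
-- def CalcLibScore(listBooks, listDays, listNbBooks, Scores, libNumber, jourPasse, jourTot):
--
--     LibScore = []
--     BooksToSend = []
--
--     for lib in range(libNumber) :
--
--         #Sort the books by score (the best at first)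
--         sortedBooks = sortBooks(Scores, listBooks[lib])
--         slicedList = sortedBooks[:min(len(sortedBooks), (jourTot-jourPasse-listDays[lib]) * listNbBooks[lib])]
--         BooksToSend.append(slicedList)
--
--         #Calcul du score de la librairy compte tenu de ses meilleurs bouquins et jours
--         LibScore.append(0)
--
--         for book in slicedList :
--             LibScore[lib] += Scores[book]
--
--     return LibScore, BooksToSend
-- ===== SOURCE B (Python) =====
-- def _top(books, Scores, take):
--     if take <= 0:
--         return []
--     by_score = {}
--     for b in books:
--         by_score[Scores[b]] = by_score.get(Scores[b], []) + [b]
--     out = []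
--     for s in sorted(by_score, reverse=True):
--         out += sorted(by_score[s], reverse=True)
--     return out[:take]
--
-- def CalcLibScore(listBooks, listDays, listNbBooks, Scores, libNumber, jourPasse, jourTot):
--     LibScore = []
--     BooksToSend = []
--     for lib in range(libNumber):
--         quota = (jourTot - jourPasse - listDays[lib]) * listNbBooks[lib]
--         sel = _top(listBooks[lib], Scores, quota)
--         BooksToSend.append(sel)
--         LibScore.append(sum(Scores[b] for b in sel))
--     return LibScore, BooksToSend
-- ===== Notes on version B (the rewrite author's own statement) =====
-- stated objective: alternative
-- what changed: B replaces A's zip + full (score,book) pair sort + separate index-updating score loop by a bucket selection: it groups book ids into a dict keyed by score, concatenates the buckets in decreasing score order (ids descending within a bucket), cuts to the quota, and appends the slice and its score sum in one pass; a non-positive quota selects nothing.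
-- intended difference: On libraries whose quota (jourTot-jourPasse-listDays[lib])*listNbBooks[lib] is negative yet greater than -len(listBooks[lib]), A's negative slice bound accidentally ships all but the last |quota| books of the descending order and scores them (e.g. ([5],[[0]]) at the witness), while B ships no books with score 0, the intended value when no shipping capacity remains. — e.g. on CalcLibScore([[0, 1]], [2], [1], [5, 3], 1, 0, 1): A returns ([5], [[0]]), B returns ([0], [[]])
import Mathlib
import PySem

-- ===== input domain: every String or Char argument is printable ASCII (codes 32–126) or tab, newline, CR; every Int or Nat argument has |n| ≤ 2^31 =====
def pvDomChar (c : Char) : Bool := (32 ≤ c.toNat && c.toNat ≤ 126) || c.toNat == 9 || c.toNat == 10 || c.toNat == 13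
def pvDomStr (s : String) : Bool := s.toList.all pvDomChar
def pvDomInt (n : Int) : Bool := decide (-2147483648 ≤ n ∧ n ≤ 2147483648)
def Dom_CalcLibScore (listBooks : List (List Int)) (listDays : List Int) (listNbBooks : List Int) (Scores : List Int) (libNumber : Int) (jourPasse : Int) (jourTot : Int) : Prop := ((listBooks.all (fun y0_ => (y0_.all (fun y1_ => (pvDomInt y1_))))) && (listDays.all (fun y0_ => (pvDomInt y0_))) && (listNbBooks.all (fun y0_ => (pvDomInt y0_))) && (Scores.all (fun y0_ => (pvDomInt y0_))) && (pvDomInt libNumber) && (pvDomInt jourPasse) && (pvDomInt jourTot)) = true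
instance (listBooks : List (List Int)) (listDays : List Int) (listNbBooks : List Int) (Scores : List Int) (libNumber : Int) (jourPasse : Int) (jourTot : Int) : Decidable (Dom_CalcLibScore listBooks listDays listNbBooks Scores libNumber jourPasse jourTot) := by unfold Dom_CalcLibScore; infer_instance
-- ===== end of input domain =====

-- B selects each library's shipment by bucketing book ids in a score-keyed dict and concatenating
-- the buckets in decreasing score order, instead of A's zip + full pair sort + index-updating
-- score loop; a non-positive day quota selects no books (see D_ below for where that differs from A).

-- ===== PORT A =====
def sortBooks (Scores : List Int) (listBooks : List Int) : List Int :=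
  let listScores := listBooks.foldl (fun acc i => acc ++ [PySem.List.pyGetD Scores i 0]) []
  (PySem.List.sorted2 (listScores.zip listBooks) (fun p => p.1) (fun p => p.2) true).map (fun p => p.2)

def calcStepA (listBooks : List (List Int)) (listDays : List Int) (listNbBooks : List Int)
    (Scores : List Int) (jourPasse : Int) (jourTot : Int)
    (st : List Int × List (List Int)) (lib : Int) : List Int × List (List Int) :=
  let sortedBooks := sortBooks Scores (PySem.List.pyGetD listBooks lib [])
  let slicedList := PySem.List.slice sortedBooks none
    (some (min (sortedBooks.length : Int)
      ((jourTot - jourPasse - PySem.List.pyGetD listDays lib 0) * PySem.List.pyGetD listNbBooks lib 0)))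
  let booksToSend := st.2 ++ [slicedList]
  let libScore0 := st.1 ++ [0]
  let libScore := slicedList.foldl (fun ls book =>
      PySem.List.pySetD ls lib (PySem.List.pyGetD ls lib 0 + PySem.List.pyGetD Scores book 0)) libScore0
  (libScore, booksToSend)

def CalcLibScore (listBooks : List (List Int)) (listDays : List Int) (listNbBooks : List Int) (Scores : List Int) (libNumber : Int) (jourPasse : Int) (jourTot : Int) : List Int × List (List Int) :=
  (PySem.List.pyRange 0 libNumber 1).foldl
    (calcStepA listBooks listDays listNbBooks Scores jourPasse jourTot) ([], [])

-- ===== PORT B =====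
-- Source B's dict-building loop: by_score[Scores[b]] = by_score.get(Scores[b], []) + [b]
def scoreBuckets (books : List Int) (Scores : List Int) : PySem.Dict Int (List Int) :=
  books.foldl (fun d b => d.modify (PySem.List.pyGetD Scores b 0) [] (fun l => l ++ [b]))
    PySem.Dict.empty

def topBooks (books : List Int) (Scores : List Int) (take_ : Int) : List Int :=
  if take_ ≤ 0 then []
  else
    let byScore := scoreBuckets books Scores
    let out := (PySem.List.sorted byScore.keys (fun s => s) true).foldl
        (fun acc s => acc ++ PySem.List.sorted (byScore.getD s []) (fun b => b) true) []
    PySem.List.slice out none (some take_)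

def calcStepB (listBooks : List (List Int)) (listDays : List Int) (listNbBooks : List Int)
    (Scores : List Int) (jourPasse : Int) (jourTot : Int)
    (st : List Int × List (List Int)) (lib : Int) : List Int × List (List Int) :=
  let quota := (jourTot - jourPasse - PySem.List.pyGetD listDays lib 0) * PySem.List.pyGetD listNbBooks lib 0
  let sel := topBooks (PySem.List.pyGetD listBooks lib []) Scores quota
  (st.1 ++ [(sel.map (fun b => PySem.List.pyGetD Scores b 0)).sum], st.2 ++ [sel])

def CalcLibScore_alt (listBooks : List (List Int)) (listDays : List Int) (listNbBooks : List Int) (Scores : List Int) (libNumber : Int) (jourPasse : Int) (jourTot : Int) : List Int × List (List Int) :=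
  (PySem.List.pyRange 0 libNumber 1).foldl
    (calcStepB listBooks listDays listNbBooks Scores jourPasse jourTot) ([], [])

-- ===== PRECONDITION & SPEC =====
-- Pre_ excludes exactly the inputs where the Python A raises an IndexError: a lib index in
-- range(libNumber) outside one of the three per-library lists, or a book index of a used library
-- outside Python's index range of Scores.
def Pre_CalcLibScore (listBooks : List (List Int)) (listDays : List Int) (listNbBooks : List Int) (Scores : List Int) (libNumber : Int) (jourPasse : Int) (jourTot : Int) : Prop :=
  libNumber ≤ 0 ∨
  (libNumber ≤ (listBooks.length : Int) ∧ libNumber ≤ (listDays.length : Int) ∧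
   libNumber ≤ (listNbBooks.length : Int) ∧
   ∀ bs ∈ listBooks.take libNumber.toNat, ∀ b ∈ bs, PySem.Raise.InRange Scores.length b)
instance (listBooks : List (List Int)) (listDays : List Int) (listNbBooks : List Int) (Scores : List Int) (libNumber : Int) (jourPasse : Int) (jourTot : Int) : Decidable (Pre_CalcLibScore listBooks listDays listNbBooks Scores libNumber jourPasse jourTot) := by unfold Pre_CalcLibScore; infer_instance

def pvWitness_CalcLibScore : List (List Int) × List Int × List Int × List Int × Int × Int × Int :=
  ([[0, 1]], [1], [2], [5, 3], 1, 0, 3)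

-- On libraries whose shipping quota (jourTot-jourPasse-listDays[lib])*listNbBooks[lib] is negative
-- yet greater than -len(listBooks[lib]), A's negative slice bound silently keeps all but the last
-- |quota| books of the descending order (a nonempty, scored shipment despite non-positive capacity);
-- B sends no books and a score of 0 there, the intended value when no shipping days remain.
def D_CalcLibScore (listBooks : List (List Int)) (listDays : List Int) (listNbBooks : List Int) (Scores : List Int) (libNumber : Int) (jourPasse : Int) (jourTot : Int) : Prop :=
  ∃ i ∈ List.range (min libNumber.toNat listNbBooks.length),
    (jourTot - jourPasse - listDays.getD i 0) * listNbBooks.getD i 0 < 0 ∧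
    0 < ((listBooks.getD i []).length : Int) +
      (jourTot - jourPasse - listDays.getD i 0) * listNbBooks.getD i 0
instance (listBooks : List (List Int)) (listDays : List Int) (listNbBooks : List Int) (Scores : List Int) (libNumber : Int) (jourPasse : Int) (jourTot : Int) : Decidable (D_CalcLibScore listBooks listDays listNbBooks Scores libNumber jourPasse jourTot) := by unfold D_CalcLibScore; infer_instance

def Spec_CalcLibScore (listBooks : List (List Int)) (listDays : List Int) (listNbBooks : List Int) (Scores : List Int) (libNumber : Int) (jourPasse : Int) (jourTot : Int) (out : List Int × List (List Int)) : Prop := ¬ D_CalcLibScore listBooks listDays listNbBooks Scores libNumber jourPasse jourTot → out = CalcLibScore_alt listBooks listDays listNbBooks Scores libNumber jourPasse jourTot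
instance (listBooks : List (List Int)) (listDays : List Int) (listNbBooks : List Int) (Scores : List Int) (libNumber : Int) (jourPasse : Int) (jourTot : Int) (out : List Int × List (List Int)) : Decidable (Spec_CalcLibScore listBooks listDays listNbBooks Scores libNumber jourPasse jourTot out) := by unfold Spec_CalcLibScore; infer_instance

def pvDiffWitness_CalcLibScore : List (List Int) × List Int × List Int × List Int × Int × Int × Int :=
  ([[0, 1]], [2], [1], [5, 3], 1, 0, 1)

def pvDiffWitnessOut_CalcLibScore : (List Int × List (List Int)) × (List Int × List (List Int)) :=
  (([5], [[0]]), ([0], [[]]))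

-- ===== CLAIM (what is proved, stated in full; the proofs are below) =====
def Claim_unchanged_CalcLibScore : Prop := ∀ (listBooks : List (List Int)) (listDays : List Int) (listNbBooks : List Int) (Scores : List Int) (libNumber : Int) (jourPasse : Int) (jourTot : Int), Dom_CalcLibScore listBooks listDays listNbBooks Scores libNumber jourPasse jourTot → Pre_CalcLibScore listBooks listDays listNbBooks Scores libNumber jourPasse jourTot → Spec_CalcLibScore listBooks listDays listNbBooks Scores libNumber jourPasse jourTot (CalcLibScore listBooks listDays listNbBooks Scores libNumber jourPasse jourTot)
def Claim_changed_CalcLibScore : Prop := Dom_CalcLibScore (pvDiffWitness_CalcLibScore.1) (pvDiffWitness_CalcLibScore.2.1) (pvDiffWitness_CalcLibScore.2.2.1) (pvDiffWitness_CalcLibScore.2.2.2.1) (pvDiffWitness_CalcLibScore.2.2.2.2.1) (pvDiffWitness_CalcLibScore.2.2.2.2.2.1) (pvDiffWitness_CalcLibScore.2.2.2.2.2.2) ∧ Pre_CalcLibScore (pvDiffWitness_CalcLibScore.1) (pvDiffWitness_CalcLibScore.2.1) (pvDiffWitness_CalcLibScore.2.2.1) (pvDiffWitness_CalcLibScore.2.2.2.1)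 (pvDiffWitness_CalcLibScore.2.2.2.2.1) (pvDiffWitness_CalcLibScore.2.2.2.2.2.1) (pvDiffWitness_CalcLibScore.2.2.2.2.2.2) ∧ D_CalcLibScore (pvDiffWitness_CalcLibScore.1) (pvDiffWitness_CalcLibScore.2.1) (pvDiffWitness_CalcLibScore.2.2.1) (pvDiffWitness_CalcLibScore.2.2.2.1) (pvDiffWitness_CalcLibScore.2.2.2.2.1) (pvDiffWitness_CalcLibScore.2.2.2.2.2.1) (pvDiffWitness_CalcLibScore.2.2.2.2.2.2) ∧ CalcLibScore (pvDiffWitness_CalcLibScore.1) (pvDiffWitness_CalcLibScore.2.1) (pvDiffWitness_CalcLibScore.2.2.1) (pvDiffWitness_CalcLibScore.2.2.2.1) (pvDiffWitness_CalcLibScore.2.2.2.2.1) (pvDiffWitness_CalcLibScore.2.2.2.2.2.1) (pvDiffWitness_CalcLibScore.2.2.2.2.2.2) = pvDiffWitnessOut_CalcLibScore.1 ∧ CalcLibScore_alt (pvDiffWitness_CalcLibScore.1) (pvDiffWitness_CalcLibScore.2.1) (pvDiffWitness_CalcLibScore.2.2.1) (pvDiffWitness_CalcLibScore.2.2.2.1)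 (pvDiffWitness_CalcLibScore.2.2.2.2.1) (pvDiffWitness_CalcLibScore.2.2.2.2.2.1) (pvDiffWitness_CalcLibScore.2.2.2.2.2.2) = pvDiffWitnessOut_CalcLibScore.2 ∧ pvDiffWitnessOut_CalcLibScore.1 ≠ pvDiffWitnessOut_CalcLibScore.2

def Claim_exact_CalcLibScore : Prop := ∀ (listBooks : List (List Int)) (listDays : List Int) (listNbBooks : List Int) (Scores : List Int) (libNumber : Int) (jourPasse : Int) (jourTot : Int), Dom_CalcLibScore listBooks listDays listNbBooks Scores libNumber jourPasse jourTot → Pre_CalcLibScore listBooks listDays listNbBooks Scores libNumber jourPasse jourTot → D_CalcLibScore listBooks listDays listNbBooks Scores libNumber jourPasse jourTot → CalcLibScore listBooks listDays listNbBooks Scores libNumber jourPasse jourTot ≠ CalcLibScore_alt listBooks listDays listNbBooks Scores libNumber jourPasse jourTot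

-- ===== LEMMAS AND PROOFS =====

-- the (score, id) descending order both programs produce
def Rsc (sc : Int → Int) (a b : Int) : Prop := sc b < sc a ∨ (sc b = sc a ∧ b ≤ a)

def bfr (sc : Int → Int) (x y : Int) : Bool :=
  decide (sc y < sc x) || (!decide (sc x < sc y) && decide (y < x))

lemma insertBy_cons {α : Type} (bf : α → α → Bool) (x y : α) (l : List α) :
    PySem.List.insertBy bf x (y :: l) = if bf x y then x :: y :: l else y :: PySem.List.insertBy bf x l := rfl

lemma pairwise_insertBy_rsc (sc : Int → Int) (x : Int) (l : List Int)
    (h : l.Pairwise (Rsc sc)) : (PySem.List.insertBy (bfr sc) x l).Pairwise (Rsc sc) := by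
  induction l with
  | nil => simp [PySem.List.insertBy]
  | cons y ys ih =>
    rw [insertBy_cons]
    rcases List.pairwise_cons.mp h with ⟨hy, hys⟩
    by_cases hxy : bfr sc x y = true
    · simp only [hxy, if_true]
      simp only [bfr, Bool.or_eq_true, Bool.and_eq_true, Bool.not_eq_eq_eq_not,
        Bool.not_true, decide_eq_true_eq, decide_eq_false_iff_not] at hxy
      refine List.pairwise_cons.mpr ⟨?_, h⟩
      intro z hz
      rcases List.mem_cons.mp hz with rfl | hz
      · unfold Rsc; omega
      · have := hy z hz; unfold Rsc at this ⊢; omega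
    · simp only [hxy, if_false, Bool.false_eq_true]
      simp only [bfr, Bool.or_eq_true, Bool.and_eq_true, Bool.not_eq_eq_eq_not,
        Bool.not_true, decide_eq_true_eq, decide_eq_false_iff_not] at hxy
      push Not at hxy
      refine List.pairwise_cons.mpr ⟨?_, ih hys⟩
      intro z hz
      rcases (PySem.List.mem_insertBy _ _ _ _).mp hz with rfl | hz
      · unfold Rsc; omega
      · exact hy z hz

lemma pairwise_foldl_insertBy_rsc (sc : Int → Int) (l : List Int) :
    ∀ acc : List Int, acc.Pairwise (Rsc sc) →
      (l.foldl (fun acc x => PySem.List.insertBy (bfr sc) x acc) acc).Pairwise (Rsc sc) := by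
  induction l with
  | nil => intro acc h; exact h
  | cons x xs ih => intro acc h; exact ih _ (pairwise_insertBy_rsc sc x acc h)

lemma pairwise_sorted2_rev (sc : Int → Int) (l : List Int) :
    (PySem.List.sorted2 l sc (fun b => b) true).Pairwise (Rsc sc) := by
  have : PySem.List.sorted2 l sc (fun b => b) true
      = l.foldl (fun acc x => PySem.List.insertBy (bfr sc) x acc) [] := rfl
  rw [this]
  exact pairwise_foldl_insertBy_rsc sc l [] (List.Pairwise.nil)

lemma buckets_getD (books Scores : List Int) (s : Int) :
    (scoreBuckets books Scores).getD s []
      = books.filter (fun b => PySem.List.pyGetD Scores b 0 == s) := by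
  unfold scoreBuckets
  rw [show books.foldl (fun d b => d.modify (PySem.List.pyGetD Scores b 0) [] (fun l => l ++ [b]))
        PySem.Dict.empty
      = (books.map (fun b => ((PySem.List.pyGetD Scores b 0 : Int), b))).foldl
        (fun d p => d.modify p.1 [] (fun l => l ++ [p.2])) PySem.Dict.empty from
    (List.foldl_map (f := fun b => ((PySem.List.pyGetD Scores b 0 : Int), b))
      (g := fun d p => d.modify p.1 [] (fun l => l ++ [p.2]))
      (l := books) (init := PySem.Dict.empty)).symm]
  rw [PySem.Dict.getD_foldl_modify_append]
  simp [List.filter_map, Function.comp_def, List.map_map]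

lemma buckets_keys (books Scores : List Int) :
    (scoreBuckets books Scores).keys
      = PySem.Set.ofList (books.map (fun b => PySem.List.pyGetD Scores b 0)) := by
  unfold scoreBuckets
  rw [PySem.Dict.keys_foldl_modify_key books (fun b => PySem.List.pyGetD Scores b 0) []
    (fun _ b => (fun l => l ++ [b])) PySem.Dict.empty]
  rw [PySem.Dict.keys_empty]
  exact PySem.Set.update_empty _

lemma count_seg (books Scores : List Int) (s x : Int) :
    (PySem.List.sorted (books.filter (fun b => PySem.List.pyGetD Scores b 0 == s))
        (fun b => b) true).count x
      = if PySem.List.pyGetD Scores x 0 = s then books.count x else 0 := by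
  rw [(PySem.List.sorted_perm _ _ _).count_eq]
  by_cases h : PySem.List.pyGetD Scores x 0 = s
  · rw [if_pos h, List.count_filter (by simp [h])]
  · rw [if_neg h, List.count_eq_zero.mpr]
    intro hmem
    exact h (by simpa using (List.mem_filter.mp hmem).2)

lemma sum_if_mem (c : Nat) (v : Int) : ∀ K : List Int, K.Nodup →
    (K.map (fun s => if v = s then c else 0)).sum = if v ∈ K then c else 0 := by
  intro K
  induction K with
  | nil => simp
  | cons s K ih =>
    intro hnd
    rcases List.nodup_cons.mp hnd with ⟨hs, hnd'⟩
    by_cases h : v = s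
    · subst h
      simp [List.sum_cons, ih hnd', hs]
    · simp [List.sum_cons, h, ih hnd', List.mem_cons]

lemma out_eq (books Scores : List Int) :
    ((PySem.List.sorted (scoreBuckets books Scores).keys (fun s => s) true).foldl
        (fun acc s => acc ++
          PySem.List.sorted ((scoreBuckets books Scores).getD s []) (fun b => b) true) [])
      = PySem.List.sorted2 books (fun b => PySem.List.pyGetD Scores b 0) (fun b => b) true := by
  have hbody : (fun (acc : List Int) (s : Int) => acc ++
        PySem.List.sorted ((scoreBuckets books Scores).getD s []) (fun b => b) true)
      = (fun acc s => acc ++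
        PySem.List.sorted (books.filter (fun b => PySem.List.pyGetD Scores b 0 == s))
          (fun b => b) true) := by
    funext acc s; rw [buckets_getD]
  rw [hbody, buckets_keys, PySem.List.foldl_append_eq_flatMap, List.nil_append]
  set sc : Int → Int := fun b => PySem.List.pyGetD Scores b 0 with hsc
  set K : List Int := PySem.List.sorted
      (PySem.Set.ofList (books.map sc)) (fun s => s) true with hK
  set seg : Int → List Int := fun s =>
      PySem.List.sorted (books.filter (fun b => sc b == s)) (fun b => b) true with hseg
  -- K is the distinct scores in strictly decreasing order
  have hKperm : K.Perm (PySem.Set.ofList (books.map sc)) := PySem.List.sorted_perm _ _ _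
  have hKnodup : K.Nodup := hKperm.nodup_iff.mpr (PySem.Set.nodup_ofList _)
  have hKmem : ∀ s : Int, s ∈ K ↔ s ∈ books.map sc := by
    intro s
    rw [hK, PySem.List.mem_sorted]
    exact PySem.Set.mem_ofList _ _
  have hKgt : K.Pairwise (fun s t => t < s) := by
    have h1 : K.Pairwise (fun s t : Int => t ≤ s) := PySem.List.sorted_pairwise_rev _ _
    exact (h1.and hKnodup).imp (fun h => lt_of_le_of_ne h.1 (Ne.symm h.2))
  -- the concatenation is a permutation of books
  have hperm : (K.flatMap seg).Perm books := by
    rw [List.perm_iff_count]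
    intro x
    rw [List.count_flatMap]
    have hmap : (K.map (List.count x ∘ seg)) = K.map (fun s => if sc x = s then books.count x else 0) := by
      apply List.map_congr_left
      intro s _
      exact count_seg books Scores s x
    rw [hmap, sum_if_mem _ _ K hKnodup]
    by_cases hx : x ∈ books
    · rw [if_pos ((hKmem (sc x)).mpr (List.mem_map_of_mem hx))]
    · have : books.count x = 0 := List.count_eq_zero.mpr hx
      rw [this]; simp
  -- and it is ordered by Rsc
  have hsegsc : ∀ s : Int, ∀ x ∈ seg s, sc x = s := by
    intro s x hx
    rw [hseg, PySem.List.mem_sorted] at hx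
    simpa using (List.mem_filter.mp hx).2
  have hpw : (K.flatMap seg).Pairwise (Rsc sc) := by
    rw [List.pairwise_flatMap]
    constructor
    · intro s _
      have h1 : (seg s).Pairwise (fun a b : Int => b ≤ a) := PySem.List.sorted_pairwise_rev _ _
      refine h1.imp_of_mem ?_
      intro a b ha hb hle
      have := hsegsc s a ha
      have := hsegsc s b hb
      unfold Rsc; omega
    · refine hKgt.imp_of_mem ?_
      intro s t _ _ hlt x hx y hy
      have := hsegsc s x hx
      have := hsegsc t y hy
      unfold Rsc; omega
  -- two Rsc-ordered permutations of books coincide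
  have hperm2 : (PySem.List.sorted2 books sc (fun b => b) true).Perm (K.flatMap seg) :=
    (PySem.List.sorted2_perm books sc (fun b => b) true).trans hperm.symm
  have := hperm2.eq_of_pairwise (le := Rsc sc)
    (fun a b _ _ hab hba => by unfold Rsc at hab hba; omega)
    (pairwise_sorted2_rev sc books) hpw
  exact this.symm



lemma insertBy_map {α β : Type} (f : α → β) (ba : α → α → Bool) (bb : β → β → Bool)
    (h : ∀ a b, bb (f a) (f b) = ba a b) (x : α) (l : List α) :
    PySem.List.insertBy bb (f x) (l.map f) = (PySem.List.insertBy ba x l).map f := by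
  induction l with
  | nil => rfl
  | cons y ys ih =>
    rw [List.map_cons, insertBy_cons, insertBy_cons, h]
    split <;> simp [ih]

lemma foldl_insertBy_map {α β : Type} (f : α → β) (ba : α → α → Bool) (bb : β → β → Bool)
    (h : ∀ a b, bb (f a) (f b) = ba a b) (l : List α) : ∀ (acc : List α),
    (l.map f).foldl (fun acc x => PySem.List.insertBy bb x acc) (acc.map f)
      = (l.foldl (fun acc x => PySem.List.insertBy ba x acc) acc).map f := by
  induction l with
  | nil => intro acc; rfl
  | cons y ys ih =>
    intro acc
    rw [List.map_cons, List.foldl_cons, List.foldl_cons, insertBy_map f ba bb h, ih]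

lemma sorted2_map {α β κ₁ κ₂ : Type} [LT κ₁] [DecidableLT κ₁] [LT κ₂] [DecidableLT κ₂]
    (f : α → β) (k1 : α → κ₁) (k2 : α → κ₂) (k1' : β → κ₁) (k2' : β → κ₂)
    (h1 : ∀ a, k1' (f a) = k1 a) (h2 : ∀ a, k2' (f a) = k2 a) (l : List α) :
    PySem.List.sorted2 (l.map f) k1' k2' true = (PySem.List.sorted2 l k1 k2 true).map f := by
  have h : ∀ a b : α,
      (fun x y : β => decide (k1' y < k1' x) || (!decide (k1' x < k1' y) && decide (k2' y < k2' x))) (f a) (f b)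
        = (fun x y : α => decide (k1 y < k1 x) || (!decide (k1 x < k1 y) && decide (k2 y < k2 x))) a b := by
    intro a b; simp only [h1, h2]
  have := foldl_insertBy_map f
    (fun x y : α => decide (k1 y < k1 x) || (!decide (k1 x < k1 y) && decide (k2 y < k2 x)))
    (fun x y : β => decide (k1' y < k1' x) || (!decide (k1' x < k1' y) && decide (k2' y < k2' x)))
    h l []
  simpa [PySem.List.sorted2] using this

lemma zip_map_self {α β : Type} (f : α → β) : ∀ l : List α,
    (l.map f).zip l = l.map (fun b => (f b, b)) := by
  intro l; induction l with
  | nil => rfl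
  | cons x xs ih => simp [ih]

lemma sortBooks_eq (Scores books : List Int) :
    sortBooks Scores books
      = PySem.List.sorted2 books (fun b => PySem.List.pyGetD Scores b 0) (fun b => b) true := by
  simp only [sortBooks]
  rw [PySem.List.foldl_append_singleton_eq_map, List.nil_append, zip_map_self]
  rw [sorted2_map (fun b => ((PySem.List.pyGetD Scores b 0 : Int), b))
        (fun b => PySem.List.pyGetD Scores b 0) (fun b => b) (fun p => p.1) (fun p => p.2)
        (fun _ => rfl) (fun _ => rfl)]
  rw [List.map_map]
  exact List.map_id' _

lemma slice_none_some {α : Type} (xs : List α) (m : Int) :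
    PySem.List.slice xs none (some m) = xs.take (PySem.List.clampIdx xs.length m) := by
  simp [PySem.List.slice]

lemma topBooks_eq (books Scores : List Int) (quota : Int)
    (hq : 0 ≤ quota ∨ (books.length : Int) + quota ≤ 0) :
    topBooks books Scores quota
      = PySem.List.slice (sortBooks Scores books) none
          (some (min ((sortBooks Scores books).length : Int) quota)) := by
  have hlen : (sortBooks Scores books).length = books.length := by
    rw [sortBooks_eq]; exact (PySem.List.sorted2_perm _ _ _ _).length_eq
  rw [slice_none_some, hlen]
  by_cases h0 : quota ≤ 0
  · unfold topBooks
    rw [if_pos h0]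
    symm
    rw [List.take_eq_nil_iff]
    by_cases hz : quota = 0
    · subst hz
      left
      have : min ((books.length : Int)) 0 = ((0 : Nat) : Int) := by omega
      rw [this, PySem.List.clampIdx_natCast]
      omega
    · left
      have hk : 0 < (-quota).toNat := by omega
      have : min ((books.length : Int)) quota = -(((-quota).toNat : Nat) : Int) := by omega
      rw [this, PySem.List.clampIdx_neg_natCast _ _ hk]
      omega
  · have hq0 : 0 ≤ quota := by omega
    unfold topBooks
    rw [if_neg h0]
    show PySem.List.slice
        ((PySem.List.sorted (scoreBuckets books Scores).keys (fun s => s) true).foldl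
          (fun acc s => acc ++
            PySem.List.sorted ((scoreBuckets books Scores).getD s []) (fun b => b) true) [])
        none (some quota) = _
    rw [out_eq, ← sortBooks_eq, slice_none_some, hlen]
    have hA : PySem.List.clampIdx books.length (min ((books.length : Int)) quota)
        = min quota.toNat books.length := by
      rw [show min ((books.length : Int)) quota = ((min books.length quota.toNat : Nat) : Int) from
        by omega, PySem.List.clampIdx_natCast]
      omega
    have hB : PySem.List.clampIdx books.length quota = min quota.toNat books.length := by
      rw [show quota = ((quota.toNat : Nat) : Int) from by omega, PySem.List.clampIdx_natCast]
      omega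
    rw [hA, hB]

lemma inner_fold (Scores pre : List Int) (c : Int) (bs : List Int) :
    bs.foldl (fun ls book =>
        PySem.List.pySetD ls (pre.length : Int)
          (PySem.List.pyGetD ls (pre.length : Int) 0 + PySem.List.pyGetD Scores book 0)) (pre ++ [c])
      = pre ++ [c + (bs.map (fun b => PySem.List.pyGetD Scores b 0)).sum] := by
  induction bs generalizing c with
  | nil => simp
  | cons b bs ih =>
    have hget : PySem.List.pyGetD (pre ++ [c]) (pre.length : Int) 0 = c := by
      simp [PySem.List.pyGetD_natCast, List.getD_eq_getElem?_getD]
    have hset : ∀ v : Int, PySem.List.pySetD (pre ++ [c]) (pre.length : Int) v = pre ++ [v] := by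
      intro v
      have h : (pre.length : Nat) < (pre ++ [c]).length := by simp
      simp [PySem.List.pySetD, PySem.List.pySet?_natCast _ _ _ h]
    rw [List.foldl_cons, hget, hset, ih, List.map_cons, List.sum_cons, add_assoc]

lemma step_eq (listBooks : List (List Int)) (listDays listNbBooks Scores : List Int)
    (jourPasse jourTot : Int) (st : List Int × List (List Int)) (n : Nat)
    (h : st.1.length = n)
    (hq : 0 ≤ (jourTot - jourPasse - PySem.List.pyGetD listDays (n : Int) 0) *
            PySem.List.pyGetD listNbBooks (n : Int) 0 ∨
          ((PySem.List.pyGetD listBooks (n : Int) []).length : Int) +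
            (jourTot - jourPasse - PySem.List.pyGetD listDays (n : Int) 0) *
              PySem.List.pyGetD listNbBooks (n : Int) 0 ≤ 0) :
    calcStepA listBooks listDays listNbBooks Scores jourPasse jourTot st (n : Int)
      = calcStepB listBooks listDays listNbBooks Scores jourPasse jourTot st (n : Int) := by
  simp only [calcStepA, calcStepB]
  rw [topBooks_eq _ _ _ hq, ← h]
  rw [inner_fold]
  simp only [zero_add]

lemma fold_eq (listBooks : List (List Int)) (listDays listNbBooks Scores : List Int)
    (jourPasse jourTot : Int) :
    ∀ (k n : Nat) (b : Int), (b - (n : Int)).toNat = k →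
      (∀ m : Nat, n ≤ m → (m : Int) < b →
        0 ≤ (jourTot - jourPasse - PySem.List.pyGetD listDays (m : Int) 0) *
              PySem.List.pyGetD listNbBooks (m : Int) 0 ∨
        ((PySem.List.pyGetD listBooks (m : Int) []).length : Int) +
          (jourTot - jourPasse - PySem.List.pyGetD listDays (m : Int) 0) *
            PySem.List.pyGetD listNbBooks (m : Int) 0 ≤ 0) →
      ∀ st : List Int × List (List Int), st.1.length = n →
      (PySem.List.pyRange (n : Int) b 1).foldl
          (calcStepA listBooks listDays listNbBooks Scores jourPasse jourTot) st
        = (PySem.List.pyRange (n : Int) b 1).foldl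
          (calcStepB listBooks listDays listNbBooks Scores jourPasse jourTot) st := by
  intro k
  induction k with
  | zero =>
    intro n b hk _ st hst
    rw [PySem.List.pyRange_one_eq_nil (by omega)]
    rfl
  | succ k ih =>
    intro n b hk hD st hst
    by_cases hb : b ≤ (n : Int)
    · rw [PySem.List.pyRange_one_eq_nil hb]
      rfl
    · rw [PySem.List.pyRange_one_cons (by omega), List.foldl_cons, List.foldl_cons]
      rw [step_eq listBooks listDays listNbBooks Scores jourPasse jourTot st n hst
        (hD n (le_refl n) (by omega))]
      have hlen' : (calcStepB listBooks listDays listNbBooks Scores jourPasse jourTot st (n : Int)).1.length = n + 1 := by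
        unfold calcStepB; simp [hst]
      have hcast : ((n : Int) + 1) = ((n + 1 : Nat) : Int) := by push_cast; ring
      rw [hcast]
      exact ih (n + 1) b (by omega)
        (fun m hm hmb => hD m (by omega) hmb) _ hlen'

-- ===== VERDICT (by name: the statement is the Claim_ definition above) =====
theorem CalcLibScore_spec : Claim_unchanged_CalcLibScore := by
  intro listBooks listDays listNbBooks Scores libNumber jourPasse jourTot _ _ hnD
  unfold D_CalcLibScore at hnD
  unfold CalcLibScore CalcLibScore_alt
  have hD : ∀ m : Nat, 0 ≤ m → (m : Int) < libNumber →
      0 ≤ (jourTot - jourPasse - PySem.List.pyGetD listDays (m : Int) 0) *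
            PySem.List.pyGetD listNbBooks (m : Int) 0 ∨
      ((PySem.List.pyGetD listBooks (m : Int) []).length : Int) +
        (jourTot - jourPasse - PySem.List.pyGetD listDays (m : Int) 0) *
          PySem.List.pyGetD listNbBooks (m : Int) 0 ≤ 0 := by
    intro m _ hm
    simp only [PySem.List.pyGetD_natCast]
    by_cases hmlen : listNbBooks.length ≤ m
    · left
      rw [List.getD_eq_default _ _ hmlen, mul_zero]
    · by_contra hcon
      push Not at hcon
      exact hnD ⟨m, List.mem_range.mpr (by omega), by omega⟩
  have h0 : ((0 : Nat) : Int) = (0 : Int) := rfl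
  rw [← h0]
  exact fold_eq listBooks listDays listNbBooks Scores jourPasse jourTot
    (libNumber - 0).toNat 0 libNumber rfl (fun m hm hmb => hD m hm hmb) ([], []) rfl
theorem CalcLibScore_changed : Claim_changed_CalcLibScore := by unfold Claim_changed_CalcLibScore; decide

lemma calcA_snd (listBooks : List (List Int)) (listDays listNbBooks Scores : List Int)
    (jourPasse jourTot : Int) (l : List Int) : ∀ st : List Int × List (List Int),
    (l.foldl (calcStepA listBooks listDays listNbBooks Scores jourPasse jourTot) st).2
      = st.2 ++ l.map (fun lib =>
          PySem.List.slice (sortBooks Scores (PySem.List.pyGetD listBooks lib [])) none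
            (some (min ((sortBooks Scores (PySem.List.pyGetD listBooks lib [])).length : Int)
              ((jourTot - jourPasse - PySem.List.pyGetD listDays lib 0) *
                PySem.List.pyGetD listNbBooks lib 0)))) := by
  induction l with
  | nil => intro st; simp
  | cons x xs ih =>
    intro st
    rw [List.foldl_cons, ih]
    simp [calcStepA]

lemma calcB_snd (listBooks : List (List Int)) (listDays listNbBooks Scores : List Int)
    (jourPasse jourTot : Int) (l : List Int) : ∀ st : List Int × List (List Int),
    (l.foldl (calcStepB listBooks listDays listNbBooks Scores jourPasse jourTot) st).2
      = st.2 ++ l.map (fun lib =>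
          topBooks (PySem.List.pyGetD listBooks lib []) Scores
            ((jourTot - jourPasse - PySem.List.pyGetD listDays lib 0) *
              PySem.List.pyGetD listNbBooks lib 0)) := by
  induction l with
  | nil => intro st; simp
  | cons x xs ih =>
    intro st
    rw [List.foldl_cons, ih]
    simp [calcStepB]

theorem CalcLibScore_tight : Claim_exact_CalcLibScore := by
  intro listBooks listDays listNbBooks Scores libNumber jourPasse jourTot _ _ hD heq
  unfold D_CalcLibScore at hD
  rcases hD with ⟨i, hir, hq, hl⟩
  have hi : i < libNumber.toNat := by
    have := List.mem_range.mp hir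
    omega
  have h2 := congrArg Prod.snd heq
  unfold CalcLibScore CalcLibScore_alt at h2
  rw [calcA_snd, calcB_snd, List.nil_append, List.nil_append] at h2
  have h3 := congrArg (fun l => l[i]?) h2
  simp only [List.getElem?_map] at h3
  have hri : (PySem.List.pyRange 0 libNumber 1)[i]? = some ((i : Int)) := by
    have hlen : (PySem.List.pyRange 0 libNumber 1).length = (libNumber - 0).toNat :=
      PySem.List.length_pyRange_one 0 libNumber
    have hilt : i < (PySem.List.pyRange 0 libNumber 1).length := by omega
    rw [List.getElem?_eq_getElem hilt, PySem.List.getElem_pyRange_one]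
    simp
  rw [hri] at h3
  simp only [Option.map_some, Option.some.injEq] at h3
  -- B's entry at i is empty, A's is not
  have hquota : (jourTot - jourPasse - PySem.List.pyGetD listDays ((i : Int)) 0) *
      PySem.List.pyGetD listNbBooks ((i : Int)) 0 ≤ 0 := by
    simp only [PySem.List.pyGetD_natCast]; omega
  rw [show topBooks (PySem.List.pyGetD listBooks ((i : Int)) []) Scores
        ((jourTot - jourPasse - PySem.List.pyGetD listDays ((i : Int)) 0) *
          PySem.List.pyGetD listNbBooks ((i : Int)) 0) = [] from by
    unfold topBooks; rw [if_pos hquota]] at h3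
  -- but A's slice at i has positive length
  have hlenS : (sortBooks Scores (PySem.List.pyGetD listBooks ((i : Int)) [])).length
      = (PySem.List.pyGetD listBooks ((i : Int)) []).length := by
    rw [sortBooks_eq]; exact (PySem.List.sorted2_perm _ _ _ _).length_eq
  have hlpos : 0 < ((PySem.List.pyGetD listBooks ((i : Int)) []).length : Int) +
      (jourTot - jourPasse - PySem.List.pyGetD listDays ((i : Int)) 0) *
        PySem.List.pyGetD listNbBooks ((i : Int)) 0 := by
    simp only [PySem.List.pyGetD_natCast]; omega
  set books := PySem.List.pyGetD listBooks ((i : Int)) [] with hbooks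
  set quota := (jourTot - jourPasse - PySem.List.pyGetD listDays ((i : Int)) 0) *
      PySem.List.pyGetD listNbBooks ((i : Int)) 0 with hquotadef
  have hqneg : quota < 0 := by
    simp only [hquotadef, PySem.List.pyGetD_natCast]; omega
  have hmin : min ((sortBooks Scores books).length : Int) quota
      = -(((-quota).toNat : Nat) : Int) := by omega
  rw [slice_none_some, hmin, hlenS, PySem.List.clampIdx_neg_natCast _ _ (by omega)] at h3
  have := congrArg List.length h3
  rw [List.length_take] at this
  simp only [List.length_nil] at this
  omega
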